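-- pv_equiv track=rewrite | github.com/keshuigu/my-leet-code | solution/solution_2501_3000.py | solution_2645
-- ===== SOURCE A (Python) =====
-- def solution_2645(word: str) -> int:
--     p, q, count = 0, 0, 0
--     pattern = 'abc'
--     while p < len(word):
--         if word[p] != pattern[q]:
--             count += 1
--         else:
--             p += 1
--         q = (q + 1) % 3
--     count += (3 - q) % 3
--     return count
-- ===== SOURCE B (Python) =====
-- def solution_2645(word: str) -> int:
--     if not word:
--         return 0
--     groups = 1 + sum(1 for a, b in zip(word, word[1:]) if b <= a)
--     return groups * 3 - len(word)
-- ===== Notes on version B (the rewrite author's own statement) =====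
-- stated objective: alternative
-- what changed: Replaces A's cyclic-pattern-pointer simulation (up to 3 loop iterations per character) with a single pass counting maximal increasing runs and the closed form groups*3 - len(word); Pre_ excludes words with characters outside the pattern alphabet, on which A's while loop never terminates (A returns no value there).
import Mathlib
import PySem

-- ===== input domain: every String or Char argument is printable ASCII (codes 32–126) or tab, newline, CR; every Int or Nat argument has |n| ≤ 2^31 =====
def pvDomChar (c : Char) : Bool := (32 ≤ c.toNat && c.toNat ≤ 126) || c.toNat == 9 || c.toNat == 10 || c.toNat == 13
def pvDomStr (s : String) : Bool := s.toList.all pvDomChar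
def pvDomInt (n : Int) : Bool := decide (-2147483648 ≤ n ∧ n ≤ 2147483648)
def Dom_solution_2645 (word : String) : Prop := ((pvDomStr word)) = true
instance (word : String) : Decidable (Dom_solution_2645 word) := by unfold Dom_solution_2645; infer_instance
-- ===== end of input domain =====

-- B counts maximal increasing runs in one pass and returns groups*3 - len (closed form) instead of
-- A's cyclic-pattern-pointer simulation (alternative decomposition, same cost); equivalent on words over 'abc' (elsewhere A never returns).

-- ===== PORT A =====
-- A's while loop, step for step; the fuel argument only makes the loop total in Lean
-- (3*len(word)+1 steps suffice whenever the loop terminates at all, i.e. when every char is in 'abc').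
def solution_2645_loop (cs : List Char) : Nat → Nat → Nat → Int → Int
  | fuel + 1, p, q, count =>
    if h : p < cs.length then
      if cs[p] ≠ ("abc".toList.getD q ' ') then
        solution_2645_loop cs fuel p ((q + 1) % 3) (count + 1)
      else
        solution_2645_loop cs fuel (p + 1) ((q + 1) % 3) count
    else
      count + (((3 - q) % 3 : Nat) : Int)
  | 0, _, _, count => count

def solution_2645 (word : String) : Int :=
  solution_2645_loop word.toList (3 * word.toList.length + 1) 0 0 0

-- ===== PORT B =====
-- zip(word, word[1:]) ported as cs.zip cs.tail (word[1:] = tail); sum of the 0/1 generator is countP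
def solution_2645_alt (word : String) : Int :=
  let cs := word.toList
  if cs = [] then 0
  else
    let groups : Int := 1 + ((cs.zip cs.tail).countP (fun pr => pr.2 ≤ pr.1) : Int)
    groups * 3 - cs.length

-- ===== PRECONDITION & SPEC =====
-- Pre_ excludes exactly the words containing a character other than 'a','b','c': on those A's
-- while loop never advances past that character and loops forever (A never returns).
def Pre_solution_2645 (word : String) : Prop :=
  (word.toList.all (fun c => c == 'a' || c == 'b' || c == 'c')) = true
instance (word : String) : Decidable (Pre_solution_2645 word) := by unfold Pre_solution_2645; infer_instance

def pvWitness_solution_2645 : String := "aacabc"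

def Spec_solution_2645 (word : String) (out : Int) : Prop := out = solution_2645_alt word
instance (word : String) (out : Int) : Decidable (Spec_solution_2645 word out) := by unfold Spec_solution_2645; infer_instance

-- ===== CLAIM (what is proved, stated in full; the proofs are below) =====
def Claim_equal_solution_2645 : Prop := ∀ (word : String), Dom_solution_2645 word → Pre_solution_2645 word → Spec_solution_2645 word (solution_2645 word)

-- ===== LEMMAS AND PROOFS =====

-- the exact cost A's loop adds from state q with remaining suffix l
def pvCost : List Char → Nat → Int
  | [], q => (((3 - q) % 3 : Nat) : Int)
  | c :: t, q =>
      (((((if c = 'a' then 0 else if c = 'b' then 1 else 2) + 3 - q) % 3 : Nat) : Int))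
        + pvCost t (((if c = 'a' then 0 else if c = 'b' then 1 else 2) + 1) % 3)

lemma pvLoop_cost : ∀ (l cs : List Char) (p q : Nat) (count : Int) (fuel : Nat),
    cs.drop p = l → (∀ c ∈ l, c = 'a' ∨ c = 'b' ∨ c = 'c') → q < 3 →
    3 * l.length + 1 ≤ fuel →
    solution_2645_loop cs fuel p q count = count + pvCost l q := by
  intro l
  induction l with
  | nil =>
    intro cs p q count fuel hd _ hq hf
    obtain ⟨f, rfl⟩ : ∃ f, fuel = f + 1 := ⟨fuel - 1, by omega⟩
    have hp : ¬ p < cs.length := by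
      have := List.drop_eq_nil_iff.mp hd; omega
    simp [solution_2645_loop, hp, pvCost]
  | cons c t ih =>
    intro cs p q count fuel hd hall hq hf
    obtain ⟨f, rfl⟩ : ∃ f, fuel = f + 3 := ⟨fuel - 3, by simp at hf; omega⟩
    have hp : p < cs.length := by
      by_contra hp
      have := List.drop_eq_nil_iff.mpr (by omega : cs.length ≤ p)
      rw [hd] at this; simp at this
    have hget : cs[p] = c := by
      have h0 : cs[p]? = some c := by
        have h1 : (cs.drop p)[0]? = some c := by rw [hd]; rfl
        simpa [List.getElem?_drop] using h1
      simpa [List.getElem?_eq_getElem hp] using h0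
    have hdt : cs.drop (p + 1) = t := by
      have h2 : (cs.drop p).drop 1 = cs.drop (p + 1) := by rw [List.drop_drop]
      rw [← h2, hd]; simp
    have htall : ∀ c ∈ t, c = 'a' ∨ c = 'b' ∨ c = 'c' := fun c hc => hall c (by simp [hc])
    have hfb : 3 * t.length + 1 ≤ f := by simp at hf; omega
    have hc : c = 'a' ∨ c = 'b' ∨ c = 'c' := hall c (by simp)
    interval_cases q
    · -- q = 0
      rcases hc with rfl | rfl | rfl
      · rw [show solution_2645_loop cs (f + 3) p 0 (count) = solution_2645_loop cs (f + 2) (p + 1) 1 (count) by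
            rw [solution_2645_loop, dif_pos hp, hget, if_neg (by decide : ¬(('a':Char) ≠ "abc".toList.getD 0 ' '))]
            try norm_num
            try ring_nf]
        rw [ih cs (p + 1) 1 (count) (f + 2) hdt htall (by omega) (by omega)]
        simp [pvCost]
        try push_cast
        try ring
      · rw [show solution_2645_loop cs (f + 3) p 0 (count) = solution_2645_loop cs (f + 2) p 1 (count + 1) by
            rw [solution_2645_loop, dif_pos hp, hget, if_pos (by decide : ('b':Char) ≠ "abc".toList.getD 0 ' ')]
            try norm_num
            try ring_nf]
        rw [show solution_2645_loop cs (f + 2) p 1 (count + 1) = solution_2645_loop cs (f + 1) (p + 1) 2 (count + 1) by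
            rw [solution_2645_loop, dif_pos hp, hget, if_neg (by decide : ¬(('b':Char) ≠ "abc".toList.getD 1 ' '))]
            try norm_num
            try ring_nf]
        rw [ih cs (p + 1) 2 (count + 1) (f + 1) hdt htall (by omega) (by omega)]
        simp [pvCost]
        try push_cast
        try ring
      · rw [show solution_2645_loop cs (f + 3) p 0 (count) = solution_2645_loop cs (f + 2) p 1 (count + 1) by
            rw [solution_2645_loop, dif_pos hp, hget, if_pos (by decide : ('c':Char) ≠ "abc".toList.getD 0 ' ')]
            try norm_num
            try ring_nf]
        rw [show solution_2645_loop cs (f + 2) p 1 (count + 1) = solution_2645_loop cs (f + 1) p 2 (count + 2) by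
            rw [solution_2645_loop, dif_pos hp, hget, if_pos (by decide : ('c':Char) ≠ "abc".toList.getD 1 ' ')]
            try norm_num
            try ring_nf]
        rw [show solution_2645_loop cs (f + 1) p 2 (count + 2) = solution_2645_loop cs (f) (p + 1) 0 (count + 2) by
            rw [solution_2645_loop, dif_pos hp, hget, if_neg (by decide : ¬(('c':Char) ≠ "abc".toList.getD 2 ' '))]
            try norm_num
            try ring_nf]
        rw [ih cs (p + 1) 0 (count + 2) (f) hdt htall (by omega) (by omega)]
        simp [pvCost]
        try push_cast
        try ring
    · -- q = 1
      rcases hc with rfl | rfl | rfl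
      · rw [show solution_2645_loop cs (f + 3) p 1 (count) = solution_2645_loop cs (f + 2) p 2 (count + 1) by
            rw [solution_2645_loop, dif_pos hp, hget, if_pos (by decide : ('a':Char) ≠ "abc".toList.getD 1 ' ')]
            try norm_num
            try ring_nf]
        rw [show solution_2645_loop cs (f + 2) p 2 (count + 1) = solution_2645_loop cs (f + 1) p 0 (count + 2) by
            rw [solution_2645_loop, dif_pos hp, hget, if_pos (by decide : ('a':Char) ≠ "abc".toList.getD 2 ' ')]
            try norm_num
            try ring_nf]
        rw [show solution_2645_loop cs (f + 1) p 0 (count + 2) = solution_2645_loop cs (f) (p + 1) 1 (count + 2) by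
            rw [solution_2645_loop, dif_pos hp, hget, if_neg (by decide : ¬(('a':Char) ≠ "abc".toList.getD 0 ' '))]
            try norm_num
            try ring_nf]
        rw [ih cs (p + 1) 1 (count + 2) (f) hdt htall (by omega) (by omega)]
        simp [pvCost]
        try push_cast
        try ring
      · rw [show solution_2645_loop cs (f + 3) p 1 (count) = solution_2645_loop cs (f + 2) (p + 1) 2 (count) by
            rw [solution_2645_loop, dif_pos hp, hget, if_neg (by decide : ¬(('b':Char) ≠ "abc".toList.getD 1 ' '))]
            try norm_num
            try ring_nf]
        rw [ih cs (p + 1) 2 (count) (f + 2) hdt htall (by omega) (by omega)]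
        simp [pvCost]
        try push_cast
        try ring
      · rw [show solution_2645_loop cs (f + 3) p 1 (count) = solution_2645_loop cs (f + 2) p 2 (count + 1) by
            rw [solution_2645_loop, dif_pos hp, hget, if_pos (by decide : ('c':Char) ≠ "abc".toList.getD 1 ' ')]
            try norm_num
            try ring_nf]
        rw [show solution_2645_loop cs (f + 2) p 2 (count + 1) = solution_2645_loop cs (f + 1) (p + 1) 0 (count + 1) by
            rw [solution_2645_loop, dif_pos hp, hget, if_neg (by decide : ¬(('c':Char) ≠ "abc".toList.getD 2 ' '))]
            try norm_num
            try ring_nf]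
        rw [ih cs (p + 1) 0 (count + 1) (f + 1) hdt htall (by omega) (by omega)]
        simp [pvCost]
        try push_cast
        try ring
    · -- q = 2
      rcases hc with rfl | rfl | rfl
      · rw [show solution_2645_loop cs (f + 3) p 2 (count) = solution_2645_loop cs (f + 2) p 0 (count + 1) by
            rw [solution_2645_loop, dif_pos hp, hget, if_pos (by decide : ('a':Char) ≠ "abc".toList.getD 2 ' ')]
            try norm_num
            try ring_nf]
        rw [show solution_2645_loop cs (f + 2) p 0 (count + 1) = solution_2645_loop cs (f + 1) (p + 1) 1 (count + 1) by
            rw [solution_2645_loop, dif_pos hp, hget, if_neg (by decide : ¬(('a':Char) ≠ "abc".toList.getD 0 ' '))]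
            try norm_num
            try ring_nf]
        rw [ih cs (p + 1) 1 (count + 1) (f + 1) hdt htall (by omega) (by omega)]
        simp [pvCost]
        try push_cast
        try ring
      · rw [show solution_2645_loop cs (f + 3) p 2 (count) = solution_2645_loop cs (f + 2) p 0 (count + 1) by
            rw [solution_2645_loop, dif_pos hp, hget, if_pos (by decide : ('b':Char) ≠ "abc".toList.getD 2 ' ')]
            try norm_num
            try ring_nf]
        rw [show solution_2645_loop cs (f + 2) p 0 (count + 1) = solution_2645_loop cs (f + 1) p 1 (count + 2) by
            rw [solution_2645_loop, dif_pos hp, hget, if_pos (by decide : ('b':Char) ≠ "abc".toList.getD 0 ' ')]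
            try norm_num
            try ring_nf]
        rw [show solution_2645_loop cs (f + 1) p 1 (count + 2) = solution_2645_loop cs (f) (p + 1) 2 (count + 2) by
            rw [solution_2645_loop, dif_pos hp, hget, if_neg (by decide : ¬(('b':Char) ≠ "abc".toList.getD 1 ' '))]
            try norm_num
            try ring_nf]
        rw [ih cs (p + 1) 2 (count + 2) (f) hdt htall (by omega) (by omega)]
        simp [pvCost]
        try push_cast
        try ring
      · rw [show solution_2645_loop cs (f + 3) p 2 (count) = solution_2645_loop cs (f + 2) (p + 1) 0 (count) by
            rw [solution_2645_loop, dif_pos hp, hget, if_neg (by decide : ¬(('c':Char) ≠ "abc".toList.getD 2 ' '))]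
            try norm_num
            try ring_nf]
        rw [ih cs (p + 1) 0 (count) (f + 2) hdt htall (by omega) (by omega)]
        simp [pvCost]
        try push_cast
        try ring

def pvIdx (c : Char) : Int := if c = 'a' then 0 else if c = 'b' then 1 else 2

lemma pvCost_closed : ∀ (l : List Char) (prev : Char),
    (prev = 'a' ∨ prev = 'b' ∨ prev = 'c') → (∀ c ∈ l, c = 'a' ∨ c = 'b' ∨ c = 'c') →
    pvCost l (((if prev = 'a' then 0 else if prev = 'b' then 1 else 2) + 1) % 3)
      = 3 * (((prev :: l).zip l).countP (fun pr => pr.2 ≤ pr.1) : Int) + 2 - pvIdx prev - l.length := by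
  intro l
  induction l with
  | nil =>
    intro prev hprev _
    rcases hprev with rfl | rfl | rfl <;> simp [pvCost, pvIdx]
  | cons c t ih =>
    intro prev hprev hall
    have hc : c = 'a' ∨ c = 'b' ∨ c = 'c' := hall c (by simp)
    have htall : ∀ x ∈ t, x = 'a' ∨ x = 'b' ∨ x = 'c' := fun x hx => hall x (by simp [hx])
    have hzip : (prev :: c :: t).zip (c :: t) = (prev, c) :: ((c :: t).zip t) := by simp
    rw [hzip]
    have iha := ih 'a' (by simp) htall
    have ihb := ih 'b' (by simp) htall
    have ihc := ih 'c' (by simp) htall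
    simp [pvIdx] at iha ihb ihc
    rcases hprev with rfl | rfl | rfl <;> rcases hc with rfl | rfl | rfl <;>
      simp [pvCost, pvIdx, List.countP_cons, iha, ihb, ihc] <;> try push_cast <;> try ring

-- ===== VERDICT (by name: the statement is the Claim_ definition above) =====
theorem solution_2645_spec : Claim_equal_solution_2645 := by
  intro word _ hpre0
  have hpre : ∀ c ∈ word.toList, c = 'a' ∨ c = 'b' ∨ c = 'c' := by
    intro c hc
    have := List.all_eq_true.mp hpre0 c hc
    simp at this
    tauto
  unfold Spec_solution_2645 solution_2645 solution_2645_alt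
  have h := pvLoop_cost word.toList word.toList 0 0 0 (3 * word.toList.length + 1)
    (by simp) hpre (by omega) (by omega)
  rw [h]
  cases hcs : word.toList with
  | nil => simp [pvCost]
  | cons c t =>
    have hall : ∀ x ∈ c :: t, x = 'a' ∨ x = 'b' ∨ x = 'c' := by rw [← hcs]; exact hpre
    have hc : c = 'a' ∨ c = 'b' ∨ c = 'c' := hall c (by simp)
    have htall : ∀ x ∈ t, x = 'a' ∨ x = 'b' ∨ x = 'c' := fun x hx => hall x (by simp [hx])
    have hcost := pvCost_closed t c hc htall
    rcases hc with rfl | rfl | rfl <;>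
      (simp [pvIdx] at hcost; simp [pvCost, hcost, List.countP_cons]) <;> try push_cast <;> try ring
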